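-- pv_equiv track=rewrite | github.com/andim/pyrepseq | pyrepseq/nn.py | _comb_gen
-- ===== SOURCE A (Python) =====
-- from itertools import combinations, chain
--
-- def _comb_gen(seq, max_edits):
--     """
--     Generate all deletion variants up to a maximum number of deletions.
--     """
--     _len, ans = len(seq), set([seq])
--     for edit in range(1, max_edits + 1):
--         for indexes in combinations(range(_len), edit):
--             new_seq, offset = [], 0
--             for index in indexes:
--                 new_seq.append(seq[offset:index])
--                 offset = index + 1
--             new_seq.append(seq[offset:_len])
--             ans.add("".join(new_seq))
--     return ans
-- ===== SOURCE B (Python) =====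
-- def _comb_gen(seq, max_edits):
--     """
--     Generate all deletion variants up to a maximum number of deletions,
--     by dynamic programming over suffixes: row[k] holds the variants of the
--     current suffix with exactly k deletions (keep-or-delete the head char).
--     """
--     m = max(max_edits, 0)
--     row = [[""]] + [[] for _ in range(m)]
--     for c in reversed(seq):
--         row = [[c + t for t in row[0]]] + \
--               [row[k - 1] + [c + t for t in row[k]] for k in range(1, m + 1)]
--     ans = set([seq])
--     for k in range(1, max_edits + 1):
--         ans.update(row[k])
--     return ans
-- ===== Notes on version B (the rewrite author's own statement) =====
-- stated objective: alternative
-- what changed: Replaces itertools.combinations index enumeration plus slice splicing with a bottom-up dynamic program over suffixes that builds exactly-k-deletion variant lists by a keep-or-delete-the-head recurrence, then unions levels 1..max_edits into the set.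
import Mathlib
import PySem

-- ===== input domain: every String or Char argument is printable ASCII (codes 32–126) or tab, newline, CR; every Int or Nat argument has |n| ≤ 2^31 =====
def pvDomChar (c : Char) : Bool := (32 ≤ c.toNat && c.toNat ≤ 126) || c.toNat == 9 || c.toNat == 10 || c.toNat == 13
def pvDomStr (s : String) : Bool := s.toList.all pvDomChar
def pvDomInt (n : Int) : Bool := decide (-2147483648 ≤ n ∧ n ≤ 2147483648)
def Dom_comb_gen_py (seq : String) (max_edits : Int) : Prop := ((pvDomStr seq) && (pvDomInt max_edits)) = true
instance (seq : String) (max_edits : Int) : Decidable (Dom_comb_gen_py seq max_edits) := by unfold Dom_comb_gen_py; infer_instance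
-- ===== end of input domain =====

-- B replaces the combinations-and-splice enumeration by a bottom-up DP over suffixes
-- (keep-or-delete-the-head recurrence); objective: alternative (same asymptotic cost).
-- Both programs return a Python set; it is modelled as its first-insertion-order list.

-- ===== PORT A =====
-- itertools.combinations(l, k) in its exact lexicographic order (PySem has no combinations).
def pvCombos (l : List Nat) (k : Nat) : List (List Nat) :=
  match k, l with
  | 0, _ => [[]]
  | _ + 1, [] => []
  | k + 1, x :: xs => (pvCombos xs k).map (x :: ·) ++ pvCombos xs (k + 1)

-- A's inner loop: build new_seq from slices between the deletion indexes, then "".join.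
def pvSpliceA (s : List Char) (idxs : List Nat) : List Char :=
  let p := idxs.foldl
    (fun (p : List (List Char) × Nat) (index : Nat) =>
      ((p.1 ++ [PySem.List.slice s (some (p.2 : Int)) (some (index : Int))] :
          List (List Char)),
        (index + 1 : Nat)))
    ([], 0)
  (p.1 ++ [PySem.List.slice s (some (p.2 : Int)) (some (s.length : Int))]).flatten

def comb_gen_py (seq : String) (max_edits : Int) : List String :=
  (PySem.List.pyRange 1 (max_edits + 1) 1).foldl
    (fun ans edit =>
      (pvCombos (List.range seq.toList.length) edit.toNat).foldl
        (fun ans idxs => PySem.Set.add ans (String.ofList (pvSpliceA seq.toList idxs))) ans)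
    (PySem.Set.ofList [seq])

-- ===== PORT B =====
-- one step of the DP: from the row of a suffix t to the row of c::t
def pvRowGo (c : Char) (prev : List (List Char)) :
    List (List (List Char)) → List (List (List Char))
  | [] => []
  | r :: rs => (prev ++ r.map (c :: ·)) :: pvRowGo c r rs

def pvRowStep (c : Char) (row : List (List (List Char))) : List (List (List Char)) :=
  match row with
  | [] => []
  | r0 :: rest => r0.map (c :: ·) :: pvRowGo c r0 rest

def comb_gen_py_alt (seq : String) (max_edits : Int) : List String :=
  (PySem.List.pyRange 1 (max_edits + 1) 1).foldl
    (fun ans k =>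
      (PySem.List.pyGetD
          (seq.toList.foldr pvRowStep ([[]] :: List.replicate (max max_edits 0).toNat []))
          k []).foldl
        (fun ans t => PySem.Set.add ans (String.ofList t)) ans)
    (PySem.Set.ofList [seq])

-- ===== PRECONDITION & SPEC =====
def Spec_comb_gen_py (seq : String) (max_edits : Int) (out : List String) : Prop := out = comb_gen_py_alt seq max_edits
instance (seq : String) (max_edits : Int) (out : List String) : Decidable (Spec_comb_gen_py seq max_edits out) := by unfold Spec_comb_gen_py; infer_instance

-- ===== CLAIM (what is proved, stated in full; the proofs are below) =====
def Claim_equal_comb_gen_py : Prop := ∀ (seq : String) (max_edits : Int), Dom_comb_gen_py seq max_edits → Spec_comb_gen_py seq max_edits (comb_gen_py seq max_edits)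

-- ===== LEMMAS AND PROOFS =====

-- canonical "delete the indices in C" (walking s with current absolute index i)
def pvDel (i : Nat) (s : List Char) (C : List Nat) : List Char :=
  match s with
  | [] => []
  | c :: t => if i ∈ C then pvDel (i + 1) t C else c :: pvDel (i + 1) t C

-- B's value semantics: variants of s with exactly k deletions, in generation order
def pvV (s : List Char) (k : Nat) : List (List Char) :=
  match k, s with
  | 0, _ => [s]
  | _ + 1, [] => []
  | k + 1, c :: t => pvV t k ++ (pvV t (k + 1)).map (c :: ·)

theorem pvDel_of_lt (i : Nat) (s : List Char) (C : List Nat)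
    (h : ∀ j ∈ C, j < i) : pvDel i s C = s := by
  induction s generalizing i with
  | nil => rfl
  | cons c t ih =>
      have : i ∉ C := fun hm => absurd (h i hm) (lt_irrefl i)
      simp [pvDel, this, ih (i+1) (fun j hj => Nat.lt_succ_of_lt (h j hj))]

theorem pvDel_cons_lt (i j : Nat) (s : List Char) (C : List Nat)
    (h : j < i) : pvDel i s (j :: C) = pvDel i s C := by
  induction s generalizing i with
  | nil => rfl
  | cons c t ih =>
      have hij : i ≠ j := Nat.ne_of_gt h
      simp [pvDel, hij, ih (i+1) (Nat.lt_succ_of_lt h)]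

theorem pvDel_skip (d i : Nat) (u : List Char) (C : List Nat)
    (h : ∀ x ∈ C, i + d ≤ x) :
    pvDel i u C = u.take d ++ pvDel (i + d) (u.drop d) C := by
  induction d generalizing i u with
  | zero => simp
  | succ d ih =>
      cases u with
      | nil => simp [pvDel]
      | cons a u' =>
          have hi : i ∉ C := fun hm => by have := h i hm; omega
          simp only [pvDel, if_neg hi, List.take_succ_cons, List.drop_succ_cons]
          rw [ih (i+1) u' (fun x hx => by have := h x hx; omega)]
          have e : i + 1 + d = i + (d + 1) := by omega
          rw [e, List.cons_append]

theorem pvCombos_sublist {l : List Nat} {k : Nat} {C : List Nat}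
    (h : C ∈ pvCombos l k) : C.Sublist l := by
  induction l generalizing k C with
  | nil =>
      cases k with
      | zero => simp [pvCombos] at h; simp [h]
      | succ k => simp [pvCombos] at h
  | cons x xs ih =>
      cases k with
      | zero => simp [pvCombos] at h; simp [h]
      | succ k =>
          simp only [pvCombos, List.mem_append, List.mem_map] at h
          rcases h with ⟨C', hC', rfl⟩ | h
          · exact (ih hC').cons₂ x
          · exact (ih h).cons x

theorem pvCombos_map_del (s : List Char) :
    ∀ (k i : Nat), (pvCombos (List.range' i s.length) k).map (pvDel i s) = pvV s k := by
  induction s with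
  | nil =>
      intro k i
      cases k with
      | zero => simp [pvCombos, pvV, pvDel]
      | succ k => simp [pvCombos, pvV]
  | cons c t ih =>
      intro k i
      cases k with
      | zero =>
          simp [pvCombos, pvV, pvDel_of_lt i (c :: t) [] (by simp)]
      | succ k =>
          have hrange : List.range' i (c :: t).length = i :: List.range' (i+1) t.length := by
            simp [List.range'_succ]
          rw [hrange]
          simp only [pvCombos, List.map_append, List.map_map, pvV]
          congr 1
          · rw [List.map_congr_left (g := fun C => pvDel (i+1) t C), ih k (i+1)]
            intro C hC
            have hsub := pvCombos_sublist hC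
            have hmem : ∀ j ∈ C, i + 1 ≤ j := by
              intro j hj
              have := List.mem_range'_1.mp (hsub.mem hj)
              omega
            simp only [Function.comp]
            have : pvDel i (c :: t) (i :: C) = pvDel (i+1) t C := by
              simp only [pvDel, List.mem_cons, true_or, if_pos]
              exact pvDel_cons_lt (i+1) i t C (Nat.lt_succ_self i)
            simpa using this
          · have hcg : List.map (pvDel i (c :: t))
                  (pvCombos (List.range' (i+1) t.length) (k+1))
                = List.map ((c :: ·) ∘ pvDel (i+1) t)
                  (pvCombos (List.range' (i+1) t.length) (k+1)) := by
              apply List.map_congr_left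
              intro C hC
              have hsub := pvCombos_sublist hC
              have hnot : i ∉ C := by
                intro hm
                have := List.mem_range'_1.mp (hsub.mem hm)
                omega
              simp [pvDel, hnot]
            rw [hcg, ← List.map_map, ih (k+1) (i+1)]

-- A's fold of slice pieces, characterised recursively
def pvPieces (s : List Char) (off : Nat) : List Nat → List (List Char)
  | [] => [PySem.List.slice s (some (off : Int)) (some (s.length : Int))]
  | j :: C => PySem.List.slice s (some (off : Int)) (some (j : Int)) :: pvPieces s (j + 1) C

theorem pvSpliceA_foldl (s : List Char) :
    ∀ (C : List Nat) (acc : List (List Char)) (off : Nat),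
      ((C.foldl
        (fun (p : List (List Char) × Nat) (index : Nat) =>
          ((p.1 ++ [PySem.List.slice s (some (p.2 : Int)) (some (index : Int))] :
              List (List Char)), (index + 1 : Nat)))
        (acc, off)).1
        ++ [PySem.List.slice s (some ((C.foldl
        (fun (p : List (List Char) × Nat) (index : Nat) =>
          ((p.1 ++ [PySem.List.slice s (some (p.2 : Int)) (some (index : Int))] :
              List (List Char)), (index + 1 : Nat)))
        (acc, off)).2 : Int)) (some (s.length : Int))])
      = acc ++ pvPieces s off C := by
  intro C
  induction C with
  | nil => intro acc off; simp [pvPieces]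
  | cons j C ih =>
      intro acc off
      simp only [List.foldl_cons, pvPieces]
      rw [ih]
      simp

theorem pvPieces_flatten (s : List Char) :
    ∀ (C : List Nat) (off : Nat), C.Pairwise (· < ·) →
      (∀ j ∈ C, off ≤ j ∧ j < s.length) →
      (pvPieces s off C).flatten = pvDel off (s.drop off) C := by
  intro C
  induction C with
  | nil =>
      intro off _ _
      simp [pvPieces, PySem.List.slice_natCast, pvDel_of_lt off (s.drop off) [] (by simp)]
  | cons j C ih =>
      intro off hpw hb
      obtain ⟨hoffj, hjlen⟩ := hb j (List.mem_cons_self ..)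
      have hd : pvDel off (s.drop off) (j :: C) =
          (s.drop off).take (j - off) ++ pvDel j (s.drop j) (j :: C) := by
        have hstep := pvDel_skip (j - off) off (s.drop off) (j :: C) (by
          intro x hx
          rcases List.mem_cons.mp hx with rfl | hx
          · omega
          · have := (List.pairwise_cons.mp hpw).1 x hx; omega)
        rw [hstep, List.drop_drop]
        have e1 : off + (j - off) = j := by omega
        rw [e1]
      rw [hd]
      have hdropj : s.drop j = s[j] :: s.drop (j + 1) :=
        List.drop_eq_getElem_cons hjlen
      have hhead : pvDel j (s.drop j) (j :: C) = pvDel (j + 1) (s.drop (j + 1)) C := by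
        rw [hdropj]
        simp only [pvDel, List.mem_cons, true_or, if_pos]
        exact pvDel_cons_lt (j+1) j _ C (Nat.lt_succ_self j)
      rw [hhead]
      simp only [pvPieces, List.flatten_cons]
      rw [ih (j + 1) (List.pairwise_cons.mp hpw).2 (by
        intro x hx
        have h1 := (List.pairwise_cons.mp hpw).1 x hx
        have h2 := hb x (List.mem_cons_of_mem _ hx)
        omega)]
      rw [PySem.List.slice_natCast]

theorem pvSpliceA_eq_del (s : List Char) (C : List Nat)
    (hpw : C.Pairwise (· < ·)) (hb : ∀ j ∈ C, j < s.length) :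
    pvSpliceA s C = pvDel 0 s C := by
  simp only [pvSpliceA]
  rw [pvSpliceA_foldl s C [] 0]
  simpa using pvPieces_flatten s C 0 hpw (fun j hj => ⟨Nat.zero_le j, hb j hj⟩)

-- B's DP rows compute pvV
theorem pvRowGo_spec (c : Char) (t : List Char) :
    ∀ (m k : Nat),
      pvRowGo c (pvV t k) ((List.range' (k + 1) m).map (pvV t)) =
        (List.range' (k + 1) m).map (pvV (c :: t)) := by
  intro m
  induction m with
  | zero => intro k; simp [pvRowGo]
  | succ m ih =>
      intro k
      rw [List.range'_succ]
      simp only [List.map_cons, pvRowGo]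
      rw [ih (k + 1)]
      rfl

theorem pvV_nil_replicate : ∀ (m k : Nat),
    (List.range' (k + 1) m).map (pvV ([] : List Char)) = List.replicate m [] := by
  intro m
  induction m with
  | zero => intro k; simp
  | succ m ih =>
      intro k
      rw [List.range'_succ, List.replicate_succ]
      simp only [List.map_cons]
      rw [ih (k + 1)]
      rfl

theorem pvRow_spec (s : List Char) (m : Nat) :
    s.foldr pvRowStep ([[]] :: List.replicate m []) =
      (List.range' 0 (m + 1)).map (pvV s) := by
  induction s with
  | nil =>
      rw [List.range'_succ]
      simp only [List.map_cons]
      rw [pvV_nil_replicate m 0]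
      rfl
  | cons c t ih =>
      simp only [List.foldr_cons, ih]
      rw [List.range'_succ]
      simp only [List.map_cons, pvRowStep]
      congr 1
      · cases t <;> rfl
      · exact pvRowGo_spec c t m 0

-- combos of range' are strictly increasing and bounded
theorem pvCombos_range'_props {i n k : Nat} {C : List Nat}
    (h : C ∈ pvCombos (List.range' i n) k) :
    C.Pairwise (· < ·) ∧ ∀ j ∈ C, j < i + n := by
  have hsub := pvCombos_sublist h
  constructor
  · exact List.Pairwise.sublist hsub (by simp [List.pairwise_iff_getElem])
  · intro j hj
    have := List.mem_range'_1.mp (hsub.mem hj)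
    omega

-- ===== VERDICT (by name: the statement is the Claim_ definition above) =====
theorem comb_gen_py_spec : Claim_equal_comb_gen_py := by
  intro seq max_edits _
  unfold Spec_comb_gen_py comb_gen_py comb_gen_py_alt
  rw [pvRow_spec seq.toList (max max_edits 0).toNat]
  apply PySem.List.foldl_congr_mem
  intro ans k hk
  have hk1 : 1 ≤ k ∧ k < max_edits + 1 := PySem.List.mem_pyRange_one.mp hk
  have hkm : k.toNat ≤ (max max_edits 0).toNat := by omega
  have hget : PySem.List.pyGetD
      ((List.range' 0 ((max max_edits 0).toNat + 1)).map (pvV seq.toList)) k []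
      = pvV seq.toList k.toNat := by
    rw [PySem.List.pyGetD_eq_getElem _ _ (by omega) (by simp; omega)]
    rw [List.getElem_map]
    congr 1
    rw [List.getElem_range']
    omega
  rw [hget]
  have hA : (pvCombos (List.range seq.toList.length) k.toNat).map
        (String.ofList ∘ pvSpliceA seq.toList)
      = (pvV seq.toList k.toNat).map String.ofList := by
    rw [List.range_eq_range']
    rw [← pvCombos_map_del seq.toList k.toNat 0]
    rw [List.map_map]
    apply List.map_congr_left
    intro C hC
    have hprops := pvCombos_range'_props hC
    simp only [Function.comp]
    rw [pvSpliceA_eq_del seq.toList C hprops.1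
      (by intro j hj; have := hprops.2 j hj; omega)]
  calc (pvCombos (List.range seq.toList.length) k.toNat).foldl
        (fun ans idxs => PySem.Set.add ans (String.ofList (pvSpliceA seq.toList idxs))) ans
      = ((pvCombos (List.range seq.toList.length) k.toNat).map
          (String.ofList ∘ pvSpliceA seq.toList)).foldl PySem.Set.add ans := by
        rw [List.foldl_map]
        simp only [Function.comp_apply]
    _ = ((pvV seq.toList k.toNat).map String.ofList).foldl PySem.Set.add ans := by rw [hA]
    _ = (pvV seq.toList k.toNat).foldl
          (fun ans t => PySem.Set.add ans (String.ofList t)) ans := by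
          rw [List.foldl_map]
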